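-- pv_equiv track=rewrite | github.com/abolisetti/Project-Euler-Solutions | ProjectEuler5.py | check
-- ===== SOURCE A (Python) =====
-- def check(num):
--     checkList=[20,19,18,17,16,14,13,11]
--     checks=True
--     for i in checkList:
--         if num%i!=0:
--             checks=False
--             break
--     return checks
-- ===== SOURCE B (Python) =====
-- def check(num):
--     # 232792560 = lcm(20,19,18,17,16,14,13,11); num is divisible by every
--     # element of the list iff it is divisible by their lcm.
--     return num % 232792560 == 0
-- ===== Notes on version B (the rewrite author's own statement) =====
-- stated objective: simpler
-- what changed: Replaced the loop of eight short-circuiting modulo tests with a single closed-form divisibility test against the least common multiple of the check list.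
import Mathlib
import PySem

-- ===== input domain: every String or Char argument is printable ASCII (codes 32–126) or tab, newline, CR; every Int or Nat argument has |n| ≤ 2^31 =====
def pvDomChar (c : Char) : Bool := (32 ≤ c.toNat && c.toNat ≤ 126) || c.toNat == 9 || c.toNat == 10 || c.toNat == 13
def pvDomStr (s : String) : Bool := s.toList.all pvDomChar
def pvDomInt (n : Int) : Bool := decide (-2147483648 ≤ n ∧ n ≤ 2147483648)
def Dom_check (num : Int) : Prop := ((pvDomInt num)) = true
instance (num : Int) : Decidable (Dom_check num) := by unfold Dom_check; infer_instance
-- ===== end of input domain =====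

-- B replaces the loop of eight modulo tests with one closed-form test modulo their lcm 232792560 (objective: simpler).

-- ===== PORT A =====
-- the for-loop with its break: returns False at the first i with num % i != 0
def checkGo (num : Int) : List Int → Bool → Bool
  | [], checks => checks
  | i :: rest, checks =>
      if PySem.Int.mod num i ≠ 0 then false else checkGo num rest checks

def check (num : Int) : Bool :=
  let checkList : List Int := [20, 19, 18, 17, 16, 14, 13, 11]
  checkGo num checkList true

-- ===== PORT B =====
-- num % 232792560 == 0
def check_alt (num : Int) : Bool := decide (PySem.Int.mod num 232792560 = 0)

-- ===== PRECONDITION & SPEC =====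
def Spec_check (num : Int) (out : Bool) : Prop := out = check_alt num
instance (num : Int) (out : Bool) : Decidable (Spec_check num out) := by unfold Spec_check; infer_instance

-- ===== CLAIM (what is proved, stated in full; the proofs are below) =====
def Claim_equal_check : Prop := ∀ (num : Int), Dom_check num → Spec_check num (check num)

-- ===== LEMMAS AND PROOFS =====

-- 232792560 = lcm [20,19,18,17,16,14,13,11]; the backward direction multiplies up
-- pairwise-coprime factors, each coprimality given by an explicit Bézout identity.
theorem lcm_char (num : Int) :
    (232792560 : Int) ∣ num ↔
      ((20:Int) ∣ num ∧ (19:Int) ∣ num ∧ (18:Int) ∣ num ∧ (17:Int) ∣ num ∧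
       (16:Int) ∣ num ∧ (14:Int) ∣ num ∧ (13:Int) ∣ num ∧ (11:Int) ∣ num) := by
  constructor
  · intro h
    exact ⟨dvd_trans (by norm_num) h, dvd_trans (by norm_num) h, dvd_trans (by norm_num) h,
           dvd_trans (by norm_num) h, dvd_trans (by norm_num) h, dvd_trans (by norm_num) h,
           dvd_trans (by norm_num) h, dvd_trans (by norm_num) h⟩
  · rintro ⟨h20, h19, h18, h17, h16, h14, h13, h11⟩
    have h9 : (9:Int) ∣ num := dvd_trans (by norm_num) h18
    have h5 : (5:Int) ∣ num := dvd_trans (by norm_num) h20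
    have h7 : (7:Int) ∣ num := dvd_trans (by norm_num) h14
    have d144 : (144:Int) ∣ num :=
      (show IsCoprime (16:Int) 9 from ⟨4, -7, by norm_num⟩).mul_dvd h16 h9
    have d720 : (720:Int) ∣ num :=
      (show IsCoprime (144:Int) 5 from ⟨-1, 29, by norm_num⟩).mul_dvd d144 h5
    have d5040 : (5040:Int) ∣ num :=
      (show IsCoprime (720:Int) 7 from ⟨-1, 103, by norm_num⟩).mul_dvd d720 h7
    have d55440 : (55440:Int) ∣ num :=
      (show IsCoprime (5040:Int) 11 from ⟨-5, 2291, by norm_num⟩).mul_dvd d5040 h11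
    have d720720 : (720720:Int) ∣ num :=
      (show IsCoprime (55440:Int) 13 from ⟨5, -21323, by norm_num⟩).mul_dvd d55440 h13
    have d12252240 : (12252240:Int) ∣ num :=
      (show IsCoprime (720720:Int) 17 from ⟨7, -296767, by norm_num⟩).mul_dvd d720720 h17
    exact (show IsCoprime (12252240:Int) 19 from ⟨-4, 2579419, by norm_num⟩).mul_dvd d12252240 h19

-- ===== VERDICT (by name: the statement is the Claim_ definition above) =====
theorem check_spec : Claim_equal_check := by
  intro num _
  unfold Spec_check check check_alt
  simp only [checkGo, ne_eq, PySem.Int.mod_eq_zero_iff_dvd, lcm_char num]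
  split_ifs <;> simp_all
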